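-- pv_equiv track=rewrite | github.com/GitMonsters/octotetrahedral-agi | arc-puzzle-catalog/re-arc/solves/5cdb0ce3/solver.py | _component_type
-- ===== SOURCE A (Python) =====
-- def _component_type(cells):
--     cell_set = set(cells)
--     neighbors = {
--         cell: [
--             (cell[0] + dx, cell[1] + dy)
--             for dx, dy in ((1, 0), (-1, 0), (0, 1), (0, -1))
--             if (cell[0] + dx, cell[1] + dy) in cell_set
--         ]
--         for cell in cell_set
--     }
--     degrees = {cell: len(adj) for cell, adj in neighbors.items()}
--     endpoints = [cell for cell, degree in degrees.items() if degree == 1]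
--
--     if any(degree > 2 for degree in degrees.values()) or len(endpoints) != 2:
--         return 3
--
--     start = min(endpoints)
--     path = [start]
--     prev = None
--     cur = start
--     while True:
--         nxt = [cell for cell in neighbors[cur] if cell != prev]
--         if not nxt:
--             break
--         prev, cur = cur, nxt[0]
--         path.append(cur)
--
--     turns = 0
--     for i in range(len(path) - 2):
--         r1, c1 = path[i]
--         r2, c2 = path[i + 1]
--         r3, c3 = path[i + 2]
--         if (r2 - r1, c2 - c1) != (r3 - r2, c3 - c2):
--             turns += 1
--
--     return 6 if turns <= 1 else 9
-- ===== SOURCE B (Python) =====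
-- def _component_type(cells):
--     cell_set = set(cells)
--
--     def nbrs(cell):
--         r, c = cell
--         return [p for p in ((r + 1, c), (r - 1, c), (r, c + 1), (r, c - 1))
--                 if p in cell_set]
--
--     if any(len(nbrs(cell)) > 2 for cell in cell_set):
--         return 3
--     endpoints = [cell for cell in cell_set if len(nbrs(cell)) == 1]
--     if len(endpoints) != 2:
--         return 3
--
--     # flood-fill the connected component of the lexicographically first endpoint
--     start = min(endpoints)
--     visited = {start}
--     queue = [start]
--     while queue:
--         cur = queue.pop(0)
--         for n in nbrs(cur):
--             if n not in visited:
--                 visited.add(n)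
--                 queue.append(n)
--
--     # a corner is a degree-2 cell whose two neighbors are not opposite each other
--     corners = 0
--     for (r, c) in visited:
--         ns = nbrs((r, c))
--         if len(ns) == 2:
--             (r1, c1), (r2, c2) = ns
--             if (r1 + r2, c1 + c2) != (2 * r, 2 * c):
--                 corners += 1
--     return 6 if corners <= 1 else 9
-- ===== Notes on version B (the rewrite author's own statement) =====
-- stated objective: alternative
-- what changed: A walks the path cell-by-cell from the minimal endpoint and scans consecutive direction triples for turns; B flood-fills (BFS) the endpoint's connected component and counts 'corner' cells locally (degree-2 cells whose two neighbors are not opposite), which equals A's turn count.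
import Mathlib
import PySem

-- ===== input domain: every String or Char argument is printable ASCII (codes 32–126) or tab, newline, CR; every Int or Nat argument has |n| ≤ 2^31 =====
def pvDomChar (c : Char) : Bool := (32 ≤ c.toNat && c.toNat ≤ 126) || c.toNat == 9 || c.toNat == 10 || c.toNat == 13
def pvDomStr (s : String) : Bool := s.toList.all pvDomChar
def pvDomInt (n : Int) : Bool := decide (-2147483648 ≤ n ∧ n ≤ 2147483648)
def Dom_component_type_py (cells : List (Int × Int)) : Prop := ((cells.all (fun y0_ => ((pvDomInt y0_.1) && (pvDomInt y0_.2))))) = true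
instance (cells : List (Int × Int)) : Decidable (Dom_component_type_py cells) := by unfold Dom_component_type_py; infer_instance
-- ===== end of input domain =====

-- B replaces A's ordered path walk + consecutive-triple direction scan by a flood fill of the
-- start endpoint's component plus a local per-cell "corner" test (degree-2 cell whose two
-- neighbors are not opposite); objective: alternative algorithm, same exact results.

-- ===== PORT A =====
-- the four neighbor candidates of a cell, in A's ((1,0),(-1,0),(0,1),(0,-1)) order
def pvCand (c : Int × Int) : List (Int × Int) :=
  [(c.1 + 1, c.2), (c.1 - 1, c.2), (c.1, c.2 + 1), (c.1, c.2 - 1)]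

-- A's `while True` walk; Python's unbounded loop is ported with fuel |cell_set|+1, which is
-- never exhausted on inputs reaching it (the walk visits pairwise-distinct cells; proved below)
def pvWalkA (nb : PySem.Dict (Int × Int) (List (Int × Int))) :
    Nat → Option (Int × Int) → (Int × Int) → List (Int × Int) → List (Int × Int)
  | 0, _, _, path => path
  | fuel + 1, prev, cur, path =>
    match (nb.getD cur []).filter (fun cell => !(some cell == prev)) with
    | [] => path
    | n :: _ => pvWalkA nb fuel (some cur) n (path ++ [n])

-- A's `for i in range(len(path)-2)` scan over consecutive triples of the path
def pvTurnsA : List (Int × Int) → Int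
  | (r1, c1) :: (r2, c2) :: (r3, c3) :: rest =>
    (if (r2 - r1, c2 - c1) ≠ (r3 - r2, c3 - c2) then 1 else 0) +
      pvTurnsA ((r2, c2) :: (r3, c3) :: rest)
  | _ => 0

def component_type_py (cells : List (Int × Int)) : Int :=
  let cellSet : PySem.Set (Int × Int) := PySem.Set.ofList cells
  let neighbors : PySem.Dict (Int × Int) (List (Int × Int)) :=
    cellSet.foldl
      (fun d cell => d.insert cell ((pvCand cell).filter (fun p => PySem.Set.contains cellSet p)))
      PySem.Dict.empty
  let degrees : PySem.Dict (Int × Int) Int :=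
    neighbors.items.foldl (fun d cv => d.insert cv.1 (cv.2.length : Int)) PySem.Dict.empty
  let endpoints : List (Int × Int) := (degrees.items.filter (fun cd => cd.2 == 1)).map (·.1)
  if (degrees.values.any (fun d => decide (2 < d))) || endpoints.length ≠ 2 then 3
  else
    match PySem.List.min2? endpoints (fun x => x.1) (fun x => x.2) with
    | none => 3  -- dead branch: endpoints.length = 2, so min2? is some
    | some start =>
      let path := pvWalkA neighbors (cellSet.length + 1) none start [start]
      if pvTurnsA path ≤ 1 then 6 else 9

-- ===== PORT B =====
def pvNbrsB (cellSet : PySem.Set (Int × Int)) (c : Int × Int) : List (Int × Int) :=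
  (pvCand c).filter (fun p => PySem.Set.contains cellSet p)

-- B's BFS flood fill (`while queue: cur = queue.pop(0); ...`); fuel |cell_set|+1 bounds the
-- number of pops (each cell is enqueued at most once; proved below)
def pvFloodB (cellSet : PySem.Set (Int × Int)) :
    Nat → PySem.Set (Int × Int) → List (Int × Int) → PySem.Set (Int × Int)
  | 0, visited, _ => visited
  | _ + 1, visited, [] => visited
  | fuel + 1, visited, cur :: queue =>
    let s := (pvNbrsB cellSet cur).foldl
      (fun vq n => if PySem.Set.contains vq.1 n then vq else (PySem.Set.add vq.1 n, vq.2 ++ [n]))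
      (visited, queue)
    pvFloodB cellSet fuel s.1 s.2

-- B's corner test: a degree-2 cell whose two neighbors are not opposite each other
def pvCornerB (cellSet : PySem.Set (Int × Int)) (c : Int × Int) : Bool :=
  match pvNbrsB cellSet c with
  | [a, b] => decide ((a.1 + b.1, a.2 + b.2) ≠ (2 * c.1, 2 * c.2))
  | _ => false

def component_type_py_alt (cells : List (Int × Int)) : Int :=
  let cellSet : PySem.Set (Int × Int) := PySem.Set.ofList cells
  if cellSet.any (fun c => decide (2 < (pvNbrsB cellSet c).length)) then 3
  else
    let endpoints : List (Int × Int) := cellSet.filter (fun c => (pvNbrsB cellSet c).length == 1)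
    if endpoints.length ≠ 2 then 3
    else
      match PySem.List.min2? endpoints (fun x => x.1) (fun x => x.2) with
      | none => 3  -- dead branch: endpoints.length = 2
      | some start =>
        let visited := pvFloodB cellSet (cellSet.length + 1) (PySem.Set.add PySem.Set.empty start) [start]
        if visited.countP (fun c => pvCornerB cellSet c) ≤ 1 then 6 else 9

-- ===== PRECONDITION & SPEC =====
def Spec_component_type_py (cells : List (Int × Int)) (out : Int) : Prop := out = component_type_py_alt cells
instance (cells : List (Int × Int)) (out : Int) : Decidable (Spec_component_type_py cells out) := by unfold Spec_component_type_py; infer_instance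

-- ===== CLAIM (what is proved, stated in full; the proofs are below) =====
def Claim_equal_component_type_py : Prop := ∀ (cells : List (Int × Int)), Dom_component_type_py cells → Spec_component_type_py cells (component_type_py cells)

-- ===== LEMMAS AND PROOFS =====

theorem mem_pvNbrsB (S : PySem.Set (Int × Int)) (c x : Int × Int) :
    x ∈ pvNbrsB S c ↔ x ∈ pvCand c ∧ x ∈ S := by
  simp [pvNbrsB, PySem.Set.contains, List.mem_filter]

theorem pvNbrsB_sub (S : PySem.Set (Int × Int)) (c x : Int × Int) (h : x ∈ pvNbrsB S c) : x ∈ S :=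
  ((mem_pvNbrsB S c x).1 h).2

theorem pvCand_nodup (c : Int × Int) : (pvCand c).Nodup := by
  simp [pvCand, Prod.ext_iff]
  omega

theorem pvNbrsB_nodup (S : PySem.Set (Int × Int)) (c : Int × Int) : (pvNbrsB S c).Nodup :=
  (pvCand_nodup c).filter _

theorem pvNbrsB_not_self (S : PySem.Set (Int × Int)) (c : Int × Int) : c ∉ pvNbrsB S c := by
  intro h
  rcases (mem_pvNbrsB S c c).1 h with ⟨h1, -⟩
  simp [pvCand, Prod.ext_iff] at h1
  omega

theorem pvNbrsB_symm (S : PySem.Set (Int × Int)) (a b : Int × Int)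
    (ha : a ∈ S) (h : b ∈ pvNbrsB S a) : a ∈ pvNbrsB S b := by
  rcases (mem_pvNbrsB S a b).1 h with ⟨h1, hb⟩
  refine (mem_pvNbrsB S b a).2 ⟨?_, ha⟩
  simp [pvCand, Prod.ext_iff] at h1 ⊢
  omega

theorem two_mem_len_le_two {l : List (Int × Int)} {x y : Int × Int}
    (hl : l.length ≤ 2) (hx : x ∈ l) (hy : y ∈ l) (hxy : x ≠ y) :
    ∀ z ∈ l, z = x ∨ z = y := by
  match l with
  | [] => simp at hx
  | [a] => simp_all
  | [a, b] => simp_all; rcases hx with rfl | rfl <;> rcases hy with rfl | rfl <;> tauto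
  | a :: b :: c :: t => simp at hl

theorem foldl_opt_mem {α : Type} (f : Option α → α → Option α)
    (hf : ∀ acc x a, f acc x = some a → a = x ∨ acc = some a) :
    ∀ (l : List α) (acc : Option α) (b : α), l.foldl f acc = some b →
      b ∈ l ∨ acc = some b := by
  intro l
  induction l with
  | nil => intro acc b hb; exact Or.inr hb
  | cons a t ih =>
    intro acc b hb
    rcases ih (f acc a) b hb with h | h
    · exact Or.inl (List.mem_cons_of_mem a h)
    · rcases hf acc a b h with rfl | h'
      · exact Or.inl List.mem_cons_self
      · exact Or.inr h'

theorem min2?_mem {xs : List (Int × Int)} {m : Int × Int}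
    (h : PySem.List.min2? xs (fun x => x.1) (fun x => x.2) = some m) : m ∈ xs := by
  unfold PySem.List.min2? at h
  rcases foldl_opt_mem _ (fun acc x a ha => by
      match acc with
      | none => simp_all
      | some w => simp at ha; split at ha <;> simp_all) xs none m h with h | h
  · exact h
  · simp at h


theorem dict_contains_false {ν : Type} (d : PySem.Dict (Int × Int) ν) (k : Int × Int)
    (h : ∀ p ∈ d.items, p.1 ≠ k) : d.contains k = false := by
  simp [PySem.Dict.contains]
  intro a b v hm
  exact h ((a,b),v) hm

-- the dicts A builds over a nodup key list are just key-value tables in list order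
theorem dict_foldl_insert_items {β ν : Type} (kf : β → Int × Int) (vf : β → ν) :
    ∀ (l : List β) (d : PySem.Dict (Int × Int) ν),
      (l.map kf).Nodup → (∀ k ∈ l.map kf, ∀ p ∈ d.items, p.1 ≠ k) →
      (l.foldl (fun d b => d.insert (kf b) (vf b)) d).items
        = d.items ++ l.map (fun b => (kf b, vf b)) := by
  intro l
  induction l with
  | nil => simp
  | cons a t ih =>
    intro d hnd hdisj
    have hnc : d.contains (kf a) = false := dict_contains_false d (kf a) (hdisj (kf a) (by simp))
    have hins : (d.insert (kf a) (vf a)).items = d.items ++ [(kf a, vf a)] := by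
      simp [PySem.Dict.insert, hnc]
    have hstep : (a :: t).foldl (fun d b => d.insert (kf b) (vf b)) d
        = t.foldl (fun d b => d.insert (kf b) (vf b)) (d.insert (kf a) (vf a)) := by simp
    simp only [List.map_cons, List.nodup_cons] at hnd
    rw [hstep, ih (d.insert (kf a) (vf a)) hnd.2 ?_]
    · simp [hins]
    · intro k hk p hp
      rw [hins] at hp
      simp at hp
      rcases hp with hp | hp
      · exact hdisj k (by simp; right; simpa using hk) p hp
      · subst hp
        intro hak
        simp at hak
        rw [hak] at hnd
        exact hnd.1 (by simpa using hk)

theorem dict_table_get? {ν : Type} (f : (Int × Int) → ν) :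
    ∀ (l : List (Int × Int)) (x : Int × Int), x ∈ l →
      Option.map Prod.snd (List.find? (fun p => p.1 == x) (l.map fun c => (c, f c))) = some (f x) := by
  intro l
  induction l with
  | nil => simp
  | cons a t ih =>
    intro x hx
    by_cases hax : a = x
    · subst hax; simp
    · have hxt : x ∈ t := by
        rcases List.mem_cons.1 hx with h | h
        · exact absurd h.symm hax
        · exact h
      simpa [List.find?, hax] using ih x hxt

theorem nodup_subset_length {l s : List (Int × Int)} (h : l.Nodup) (hs : ∀ x ∈ l, x ∈ s) :
    l.length ≤ s.length := by
  have h1 : l.toFinset.card = l.length := List.toFinset_card_of_nodup h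
  have h2 : l.toFinset ⊆ s.toFinset := by intro x hx; simp at hx ⊢; exact hs x hx
  have h3 := Finset.card_le_card h2
  have h4 : s.toFinset.card ≤ s.length := s.toFinset_card_le
  omega

-- suffix generator of A's walk (the part appended after `acc`)
def pvW (S : PySem.Set (Int × Int)) : Nat → Option (Int × Int) → (Int × Int) → List (Int × Int)
  | 0, _, _ => []
  | fuel + 1, prev, cur =>
    match (pvNbrsB S cur).filter (fun cell => !(some cell == prev)) with
    | [] => []
    | n :: _ => n :: pvW S fuel (some cur) n

theorem pvWalkA_eq_pvW (S : PySem.Set (Int × Int)) (nb : PySem.Dict (Int × Int) (List (Int × Int)))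
    (hnb : ∀ c ∈ S, nb.getD c [] = pvNbrsB S c) :
    ∀ (fuel : Nat) (prev : Option (Int × Int)) (cur : Int × Int) (acc : List (Int × Int)),
      cur ∈ S → pvWalkA nb fuel prev cur acc = acc ++ pvW S fuel prev cur := by
  intro fuel
  induction fuel with
  | zero => intro prev cur acc _; simp [pvWalkA, pvW]
  | succ f ih =>
    intro prev cur acc hc
    rw [pvWalkA, pvW, hnb cur hc]
    cases h : (pvNbrsB S cur).filter (fun cell => !(some cell == prev)) with
    | nil => simp
    | cons n rest =>
      have hn : n ∈ pvNbrsB S cur := by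
        have : n ∈ (pvNbrsB S cur).filter (fun cell => !(some cell == prev)) := by
          rw [h]; exact List.mem_cons_self
        exact (List.mem_filter.1 this).1
      show pvWalkA nb f (some cur) n (acc ++ [n]) = acc ++ (n :: pvW S f (some cur) n)
      rw [ih (some cur) n (acc ++ [n]) (pvNbrsB_sub S cur n hn)]
      simp

def pvAdj (S : PySem.Set (Int × Int)) (a b : Int × Int) : Prop :=
  b ∈ pvNbrsB S a ∧ a ∈ pvNbrsB S b

def pvTripOK (S : PySem.Set (Int × Int)) (p : List (Int × Int)) : Prop :=
  ∀ a b c, [a, b, c] <:+: p → ∀ x ∈ pvNbrsB S b, x = a ∨ x = c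

def pvInv (S : PySem.Set (Int × Int)) (p : List (Int × Int)) : Prop :=
  p.Nodup ∧ List.IsChain (pvAdj S) p ∧ pvTripOK S p ∧ ∀ x ∈ p, x ∈ S

def pvEndOK (S : PySem.Set (Int × Int)) (p : List (Int × Int)) : Prop :=
  (∀ x y, [x, y] <:+ p → ∀ z ∈ pvNbrsB S y, z = x) ∧
    (∀ c, p = [c] → pvNbrsB S c = [])

theorem chain_suffix_pair {S : PySem.Set (Int × Int)} {p : List (Int × Int)} {x y : Int × Int}
    (hch : List.IsChain (pvAdj S) p) (hs : [x, y] <:+ p) : pvAdj S x y := by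
  rcases hs with ⟨s, hs⟩
  have : p = (s ++ [x]) ++ [y] := by simp [← hs]
  rw [this] at hch
  rcases List.isChain_append.1 hch with ⟨-, -, h⟩
  exact h x (by simp) y (by simp)

theorem trip_append_cases {p : List (Int × Int)} {n a b c : Int × Int}
    (h : [a, b, c] <:+: p ++ [n]) : [a, b, c] <:+: p ∨ ([a, b] <:+ p ∧ c = n) := by
  rcases h with ⟨s, t, hst⟩
  rcases List.eq_nil_or_concat t with rfl | ⟨t', x, rfl⟩
  · right
    simp only [List.append_nil] at hst
    have h2 : (s ++ [a, b]).concat c = p.concat n := by simpa using hst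
    rcases List.concat_inj.1 h2 with ⟨h1, h2⟩
    exact ⟨⟨s, by simpa using h1⟩, h2⟩
  · left
    have h2 : (s ++ [a, b, c] ++ t').concat x = p.concat n := by simpa using hst
    rcases List.concat_inj.1 h2 with ⟨h1, -⟩
    exact ⟨s, t', by simpa using h1⟩

theorem len_le_one_of_all_eq {l : List (Int × Int)} {a : Int × Int}
    (hnd : l.Nodup) (h : ∀ z ∈ l, z = a) : l.length ≤ 1 := by
  match l with
  | [] => simp
  | [x] => simp
  | x :: y :: t =>
    exfalso
    have hx := h x (by simp)
    have hy := h y (by simp)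
    subst hx
    simp [hy] at hnd

theorem noRevisit (S : PySem.Set (Int × Int))
    {start : Int × Int} (hstart1 : (pvNbrsB S start).length = 1)
    {q : List (Int × Int)} {cur n : Int × Int}
    (hhead : (q ++ [cur]).head? = some start)
    (hinv : pvInv S (q ++ [cur]))
    (hn : n ∈ pvNbrsB S cur)
    (hprev : ∀ v, q.getLast? = some v → n ≠ v) :
    n ∉ q ++ [cur] := by
  rcases hinv with ⟨hnd, hch, htrip, hmem⟩
  intro hmem'
  have hcurS : cur ∈ S := hmem cur (by simp)
  have hncur : n ≠ cur := by
    intro h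
    rw [h] at hn
    exact pvNbrsB_not_self S cur hn
  have hnq : n ∈ q := by
    rcases List.mem_append.1 hmem' with h | h
    · exact h
    · exact absurd (List.mem_singleton.1 h) hncur
  have hcurq : cur ∉ q := by
    intro hc
    rcases List.nodup_append.1 hnd with ⟨-, -, hdisj⟩
    exact hdisj cur hc cur (List.mem_singleton_self cur) rfl
  rcases List.append_of_mem hnq with ⟨l1, l2, hq⟩
  have hcn : cur ∈ pvNbrsB S n :=
    pvNbrsB_symm S cur n hcurS hn
  cases l1 with
  | nil =>
    cases l2 with
    | nil =>
      -- q = [n]; n is prev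
      subst hq
      exact hprev n rfl rfl
    | cons w l2' =>
      -- n is the start; its single neighborhood contains both w and cur
      subst hq
      have hstart_eq : start = n := by
        simp at hhead; exact hhead.symm
      subst hstart_eq
      have hwadj : pvAdj S start w := by
        have h2 : List.IsChain (pvAdj S) (start :: w :: (l2' ++ [cur])) := by simpa using hch
        exact (List.isChain_cons_cons.1 h2).1
      have hw : w ∈ pvNbrsB S start := hwadj.1
      have huni : ∀ z ∈ pvNbrsB S start, ∀ z' ∈ pvNbrsB S start, z = z' := by
        intro z hz z' hz'
        cases hh : pvNbrsB S start with
        | nil => rw [hh] at hz; simp at hz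
        | cons u t =>
          rw [hh] at hstart1
          simp at hstart1
          subst hstart1
          rw [hh] at hz hz'
          simp at hz hz'
          rw [hz, hz']
      have hwc : w = cur := huni w hw cur hcn
      exact hcurq (by simp [← hwc])
  | cons a l1' =>
    cases l2 with
    | nil =>
      -- n is the last element of q, i.e. n = prev
      subst hq
      exact hprev n List.getLast?_concat rfl
    | cons w l2' =>
      -- triple [b, n, w] sits inside the path
      subst hq
      have hl1ne : (a :: l1') ≠ [] := by simp
      set b := (a :: l1').getLast hl1ne with hb
      have hdec : (a :: l1') = (a :: l1').dropLast ++ [b] := (List.dropLast_concat_getLast hl1ne).symm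
      have htr : [b, n, w] <:+: ((a :: l1') ++ n :: (w :: l2')) ++ [cur] := by
        refine ⟨(a :: l1').dropLast, l2' ++ [cur], ?_⟩
        conv_rhs => rw [hdec]
        simp
      have hbw := htrip b n w htr cur hcn
      have hbq : b ∈ (a :: l1') := List.getLast_mem hl1ne
      rcases hbw with hbw | hbw
      · exact hcurq (by rw [hbw]; exact List.mem_append_left _ hbq)
      · exact hcurq (by rw [hbw]; simp)

theorem walkInv (S : PySem.Set (Int × Int))
    (hdeg : ∀ c ∈ S, (pvNbrsB S c).length ≤ 2)
    {start : Int × Int} (hstart1 : (pvNbrsB S start).length = 1) :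
    ∀ (fuel : Nat) (q : List (Int × Int)) (cur : Int × Int),
      (q ++ [cur]).head? = some start →
      pvInv S (q ++ [cur]) →
      S.length < fuel + (q ++ [cur]).length →
      pvInv S ((q ++ [cur]) ++ pvW S fuel q.getLast? cur) ∧
        pvEndOK S ((q ++ [cur]) ++ pvW S fuel q.getLast? cur) ∧
        ((q ++ [cur]) ++ pvW S fuel q.getLast? cur).head? = some start := by
  intro fuel
  induction fuel with
  | zero =>
    intro q cur hhead hinv harith
    exfalso
    have hlen := nodup_subset_length hinv.1 hinv.2.2.2
    omega
  | succ f ih =>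
    intro q cur hhead hinv harith
    rw [pvW]
    cases hflt : (pvNbrsB S cur).filter (fun cell => !(some cell == q.getLast?)) with
    | nil =>
      -- the walk stops here
      refine ⟨by simpa using hinv, ⟨?_, ?_⟩, by simpa using hhead⟩
      · intro x y hs z hz
        rcases hs with ⟨s, hs⟩
        simp only [List.append_nil] at hs
        have h2 : (s ++ [x]).concat y = q.concat cur := by simpa using hs
        rcases List.concat_inj.1 h2 with ⟨h1, rfl⟩
        have hql : q.getLast? = some x := by rw [← h1]; exact List.getLast?_concat
        have h3 := List.filter_eq_nil_iff.1 hflt z hz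
        simp [hql] at h3
        exact h3
      · intro c hc
        simp only [List.append_nil] at hc
        have hq0 : q = [] := by
          cases q with
          | nil => rfl
          | cons a t => exfalso; have h5 := congrArg List.length hc; simp at h5
        subst hq0
        simp at hc
        subst hc
        refine List.eq_nil_iff_forall_not_mem.2 ?_
        intro z hz
        have h3 := List.filter_eq_nil_iff.1 hflt z hz
        simp at h3
    | cons n rest =>
      have hn : n ∈ pvNbrsB S cur ∧ ¬(some n == q.getLast?) = true := by
        have h0 : n ∈ (pvNbrsB S cur).filter (fun cell => !(some cell == q.getLast?)) := by
          rw [hflt]; exact List.mem_cons_self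
        simpa using List.mem_filter.1 h0
      have hprev : ∀ v, q.getLast? = some v → n ≠ v := by
        intro v hv hnv
        rcases hn with ⟨-, h2⟩
        rw [hv, hnv] at h2
        simp at h2
      have hnmem : n ∉ q ++ [cur] := noRevisit S hstart1 hhead hinv hn.1 hprev
      rcases hinv with ⟨hnd, hch, htrip, hmem⟩
      have hcurS : cur ∈ S := hmem cur (by simp)
      have hnS : n ∈ S := pvNbrsB_sub S cur n hn.1
      have hadj : pvAdj S cur n := ⟨hn.1, pvNbrsB_symm S cur n hcurS hn.1⟩
      -- invariants for the extended path
      have hinv' : pvInv S ((q ++ [cur]) ++ [n]) := by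
        refine ⟨?_, ?_, ?_, ?_⟩
        · rw [List.nodup_append]
          refine ⟨hnd, List.nodup_singleton n, ?_⟩
          intro a ha b hb hab
          simp at hb
          subst hb
          exact hnmem (hab ▸ ha)
        · rw [List.isChain_append]
          refine ⟨hch, by simp, ?_⟩
          intro x hx y hy
          simp at hy
          subst hy
          rw [List.getLast?_concat] at hx
          simp at hx
          subst hx
          exact hadj
        · intro a b c hin z hz
          rcases trip_append_cases hin with h | ⟨hab, hc2⟩
          · exact htrip a b c h z hz
          · rw [hc2]
            -- the new triple [a, cur, n]
            have hbcur : b = cur ∧ q.getLast? = some a := by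
              rcases hab with ⟨s, hs⟩
              have h2 : (s ++ [a]).concat b = q.concat cur := by simpa using hs
              rcases List.concat_inj.1 h2 with ⟨h1, rfl⟩
              exact ⟨rfl, by rw [← h1]; exact List.getLast?_concat⟩
            rcases hbcur with ⟨hbc, hqa⟩
            subst hbc
            have ha' : a ∈ pvNbrsB S b := (chain_suffix_pair hch hab).2
            have han : a ≠ n := by
              intro h
              exact hnmem (h ▸ List.mem_append_left _ (List.mem_of_getLast? hqa))
            exact two_mem_len_le_two (hdeg b (hmem b (List.mem_append_right _ (by simp)))) ha' hn.1 han z hz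
        · intro x hx
          rcases List.mem_append.1 hx with h | h
          · exact hmem x h
          · simp at h; subst h; exact hnS
      have hq'last : (q ++ [cur]).getLast? = some cur := List.getLast?_concat
      have hhead' : ((q ++ [cur]) ++ [n]).head? = some start := by
        rw [List.head?_append, hhead]
        rfl
      have harith' : S.length < f + ((q ++ [cur]) ++ [n]).length := by
        simp only [List.length_append, List.length_cons, List.length_nil] at harith ⊢
        omega
      have hres := ih (q ++ [cur]) n hhead' hinv' harith'
      rw [hq'last] at hres
      show pvInv S ((q ++ [cur]) ++ (n :: pvW S f (some cur) n)) ∧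
          pvEndOK S ((q ++ [cur]) ++ (n :: pvW S f (some cur) n)) ∧
          ((q ++ [cur]) ++ (n :: pvW S f (some cur) n)).head? = some start
      have heq : (q ++ [cur]) ++ (n :: pvW S f (some cur) n)
          = ((q ++ [cur]) ++ [n]) ++ pvW S f (some cur) n := by simp
      rw [heq]
      exact hres

theorem closedSet (S : PySem.Set (Int × Int)) {P : List (Int × Int)} {start : Int × Int}
    (hstart1 : (pvNbrsB S start).length = 1)
    (hinv : pvInv S P) (hend : pvEndOK S P) (hhead : P.head? = some start) :
    ∀ u ∈ P, ∀ z ∈ pvNbrsB S u, z ∈ P := by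
  rcases hinv with ⟨hnd, hch, htrip, hmem⟩
  intro u hu z hz
  rcases List.append_of_mem hu with ⟨l1, l2, hP⟩
  cases l1 with
  | nil =>
    cases l2 with
    | nil =>
      exfalso
      rw [hend.2 u (by simpa using hP)] at hz
      simp at hz
    | cons w l2' =>
      have hus : u = start := by
        rw [hP] at hhead; simp at hhead; exact hhead
      have hw : w ∈ pvNbrsB S u := by
        have h2 : List.IsChain (pvAdj S) (u :: w :: l2') := by rw [hP] at hch; simpa using hch
        exact (List.isChain_cons_cons.1 h2).1.1
      have hzw : z = w := by
        rw [hus] at hz hw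
        cases hh : pvNbrsB S start with
        | nil => rw [hh] at hz; simp at hz
        | cons x t =>
          rw [hh] at hstart1 hz hw
          simp at hstart1
          subst hstart1
          simp at hz hw
          rw [hz, hw]
      rw [hP, hzw]
      simp
  | cons a l1' =>
    have hl1ne : (a :: l1') ≠ [] := by simp
    set b := (a :: l1').getLast hl1ne with hb
    have hdec : (a :: l1') = (a :: l1').dropLast ++ [b] := (List.dropLast_concat_getLast hl1ne).symm
    have hbP : b ∈ P := by
      rw [hP]
      exact List.mem_append_left _ (List.getLast_mem hl1ne)
    cases l2 with
    | nil =>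
      have hsuf : [b, u] <:+ P := by
        refine ⟨(a :: l1').dropLast, ?_⟩
        rw [hP]
        conv_rhs => rw [hdec]
        simp
      rw [hend.1 b u hsuf z hz]
      exact hbP
    | cons w l2' =>
      have htr : [b, u, w] <:+: P := by
        refine ⟨(a :: l1').dropLast, l2', ?_⟩
        rw [hP]
        conv_rhs => rw [hdec]
        simp
      rcases htrip b u w htr z hz with rfl | rfl
      · exact hbP
      · rw [hP]; simp

theorem corner_false_of_len_le_one {S : PySem.Set (Int × Int)} {c : Int × Int}
    (hl : (pvNbrsB S c).length ≤ 1) : pvCornerB S c = false := by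
  unfold pvCornerB
  cases h : pvNbrsB S c with
  | nil => rfl
  | cons x t =>
    cases t with
    | nil => rfl
    | cons y t2 => rw [h] at hl; simp at hl

theorem cornerAux (S : PySem.Set (Int × Int))
    (hdeg : ∀ c ∈ S, (pvNbrsB S c).length ≤ 2) :
    ∀ (q : List (Int × Int)) (a : Int × Int),
      (a :: q).Nodup → List.IsChain (pvAdj S) (a :: q) → pvTripOK S (a :: q) →
      (∀ x y, [x, y] <:+ (a :: q) → ∀ z ∈ pvNbrsB S y, z = x) →
      (∀ x ∈ a :: q, x ∈ S) →
      (List.countP (fun c => pvCornerB S c) q : Int) = pvTurnsA (a :: q) := by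
  intro q
  induction q with
  | nil => intro a _ _ _ _ _; simp [pvTurnsA]
  | cons b t ih =>
    intro a hnd hch htrip hend hmem
    cases t with
    | nil =>
      -- last cell has at most one in-set neighbor, hence is no corner
      have hone : ∀ z ∈ pvNbrsB S b, z = a := hend a b (by simp) 
      have hlen : (pvNbrsB S b).length ≤ 1 :=
        len_le_one_of_all_eq (pvNbrsB_nodup S b) hone
      simp [corner_false_of_len_le_one hlen, pvTurnsA]
    | cons c t' =>
      -- b is interior: its neighborhood is exactly {a, c}
      have hab : pvAdj S a b := (List.isChain_cons_cons.1 hch).1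
      have hbc : pvAdj S b c := (List.isChain_cons_cons.1 (List.isChain_cons_cons.1 hch).2).1
      have ha' : a ∈ pvNbrsB S b := hab.2
      have hc' : c ∈ pvNbrsB S b := hbc.1
      have hac : a ≠ c := by
        intro h
        have : a ∉ b :: c :: t' := (List.nodup_cons.1 hnd).1
        exact this (by simp [h])
      have hlen : (pvNbrsB S b).length ≤ 2 := hdeg b (hmem b (by simp))
      have hcorner : pvCornerB S b = decide ((a.1 + c.1, a.2 + c.2) ≠ (2 * b.1, 2 * b.2)) := by
        cases hh : pvNbrsB S b with
        | nil => rw [hh] at ha'; simp at ha'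
        | cons u t2 =>
          cases t2 with
          | nil =>
            exfalso
            rw [hh] at ha' hc'
            simp at ha' hc'
            exact hac (ha'.trans hc'.symm)
          | cons v t3 =>
            have ht3 : t3 = [] := by
              rw [hh] at hlen
              simp only [List.length_cons] at hlen
              exact List.length_eq_zero_iff.1 (by omega)
            subst ht3
            have huv : u ≠ v := by
              have := pvNbrsB_nodup S b
              rw [hh] at this
              simp at this
              exact this
            have hu := two_mem_len_le_two hlen ha' hc' hac u (by rw [hh]; simp)
            have hv := two_mem_len_le_two hlen ha' hc' hac v (by rw [hh]; simp)
            have hsum : u.1 + v.1 = a.1 + c.1 ∧ u.2 + v.2 = a.2 + c.2 := by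
              rcases hu with hu | hu <;> rcases hv with hv | hv
              · exact absurd (hu.trans hv.symm) huv
              · rw [hu, hv]; exact ⟨rfl, rfl⟩
              · rw [hu, hv]; constructor <;> omega
              · exact absurd (hu.trans hv.symm) huv
            unfold pvCornerB
            rw [hh]
            simp only [hsum.1, hsum.2]
      -- split both counters
      have hstep : (List.countP (fun c => pvCornerB S c) (b :: c :: t') : Int)
          = (List.countP (fun c => pvCornerB S c) (c :: t') : Int)
            + (if pvCornerB S b then 1 else 0) := by
        rw [List.countP_cons]
        split <;> simp
      have hturn : pvTurnsA (a :: b :: c :: t')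
          = (if (b.1 - a.1, b.2 - a.2) ≠ (c.1 - b.1, c.2 - b.2) then 1 else 0)
            + pvTurnsA (b :: c :: t') := rfl
      have hiff : ((a.1 + c.1, a.2 + c.2) ≠ (2 * b.1, 2 * b.2))
          ↔ ((b.1 - a.1, b.2 - a.2) ≠ (c.1 - b.1, c.2 - b.2)) := by
        simp only [ne_eq, Prod.mk.injEq, not_and]
        constructor
        · intro h h1 h2; apply h <;> omega
        · intro h h1 h2; apply h <;> omega
      have hIH := ih b (List.nodup_cons.1 hnd).2
        (List.isChain_cons_cons.1 hch).2
        (fun x y z hin => htrip x y z (List.infix_cons hin))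
        (fun x y hs => hend x y (hs.trans (List.suffix_cons a _)))
        (fun x hx => hmem x (by simp at hx ⊢; tauto))
      rw [hstep, hturn, hIH, hcorner]
      by_cases hcond : ((a.1 + c.1, a.2 + c.2) ≠ (2 * b.1, 2 * b.2))
      · rw [if_pos (by rw [decide_eq_true_eq]; exact hcond), if_pos (hiff.1 hcond)]
        ring
      · rw [if_neg (by rw [decide_eq_true_eq]; exact hcond), if_neg (fun h => hcond (hiff.2 h))]
        ring

theorem chainProp (S : PySem.Set (Int × Int)) (V : List (Int × Int))
    (hcl : ∀ u ∈ V, ∀ z ∈ pvNbrsB S u, z ∈ V) :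
    ∀ (l : List (Int × Int)), List.IsChain (pvAdj S) l →
      ∀ h, l.head? = some h → h ∈ V → ∀ x ∈ l, x ∈ V := by
  intro l
  induction l with
  | nil => simp
  | cons a t ih =>
    intro hch h hh hV x hx
    simp at hh
    subst hh
    rcases List.mem_cons.1 hx with rfl | hx'
    · exact hV
    · cases t with
      | nil => simp at hx'
      | cons b t' =>
        have hab : pvAdj S a b := (List.isChain_cons_cons.1 hch).1
        have hbV : b ∈ V := hcl a hV b hab.1
        exact ih (List.isChain_cons_cons.1 hch).2 b rfl hbV x hx'

theorem floodFold (P : List (Int × Int)) :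
    ∀ (ns : List (Int × Int)) (v qu : List (Int × Int)),
      v.Nodup → (∀ u ∈ qu, u ∈ v) → (∀ u ∈ v, u ∈ P) → (∀ z ∈ ns, z ∈ P) →
      (∀ x ∈ v, x ∈ (ns.foldl (fun vq n => if PySem.Set.contains vq.1 n then vq
          else (PySem.Set.add vq.1 n, vq.2 ++ [n])) (v, qu)).1) ∧
      (ns.foldl (fun vq n => if PySem.Set.contains vq.1 n then vq
          else (PySem.Set.add vq.1 n, vq.2 ++ [n])) (v, qu)).1.Nodup ∧
      (∀ u ∈ (ns.foldl (fun vq n => if PySem.Set.contains vq.1 n then vq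
          else (PySem.Set.add vq.1 n, vq.2 ++ [n])) (v, qu)).2,
        u ∈ (ns.foldl (fun vq n => if PySem.Set.contains vq.1 n then vq
          else (PySem.Set.add vq.1 n, vq.2 ++ [n])) (v, qu)).1) ∧
      (∀ u ∈ (ns.foldl (fun vq n => if PySem.Set.contains vq.1 n then vq
          else (PySem.Set.add vq.1 n, vq.2 ++ [n])) (v, qu)).1, u ∈ P) ∧
      (∀ z ∈ ns, z ∈ (ns.foldl (fun vq n => if PySem.Set.contains vq.1 n then vq
          else (PySem.Set.add vq.1 n, vq.2 ++ [n])) (v, qu)).1) ∧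
      (∀ u ∈ (ns.foldl (fun vq n => if PySem.Set.contains vq.1 n then vq
          else (PySem.Set.add vq.1 n, vq.2 ++ [n])) (v, qu)).1,
        u ∈ v ∨ u ∈ (ns.foldl (fun vq n => if PySem.Set.contains vq.1 n then vq
          else (PySem.Set.add vq.1 n, vq.2 ++ [n])) (v, qu)).2) ∧
      (∀ u ∈ qu, u ∈ (ns.foldl (fun vq n => if PySem.Set.contains vq.1 n then vq
          else (PySem.Set.add vq.1 n, vq.2 ++ [n])) (v, qu)).2) ∧
      (ns.foldl (fun vq n => if PySem.Set.contains vq.1 n then vq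
          else (PySem.Set.add vq.1 n, vq.2 ++ [n])) (v, qu)).1.length + qu.length
        = v.length + (ns.foldl (fun vq n => if PySem.Set.contains vq.1 n then vq
          else (PySem.Set.add vq.1 n, vq.2 ++ [n])) (v, qu)).2.length := by
  intro ns
  induction ns with
  | nil =>
    intro v qu hnd hquv hvP _
    exact ⟨fun x hx => hx, hnd, hquv, hvP, by simp, fun u hu => Or.inl hu, fun u hu => hu, rfl⟩
  | cons n ns' ih =>
    intro v qu hnd hquv hvP hnsP
    by_cases hc : PySem.Set.contains v n = true
    · have hstep : (List.foldl (fun vq n => if PySem.Set.contains vq.1 n then vq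
          else (PySem.Set.add vq.1 n, vq.2 ++ [n])) (v, qu) (n :: ns'))
          = (List.foldl (fun vq n => if PySem.Set.contains vq.1 n then vq
          else (PySem.Set.add vq.1 n, vq.2 ++ [n])) (v, qu) ns') := by
        rw [List.foldl_cons]
        simp only []
        rw [hc]
        simp
      rw [hstep]
      have hr := ih v qu hnd hquv hvP (fun z hz => hnsP z (by simp [hz]))
      refine ⟨hr.1, hr.2.1, hr.2.2.1, hr.2.2.2.1, ?_, hr.2.2.2.2.2⟩
      intro z hz
      rcases List.mem_cons.1 hz with rfl | hz'
      · have hzv : z ∈ v := by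
          simpa [PySem.Set.contains, List.contains_iff_mem] using hc
        exact hr.1 z hzv
      · exact hr.2.2.2.2.1 z hz'
    · have hcf : PySem.Set.contains v n = false := by
        rw [← Bool.not_eq_true]
        exact hc
      have hnv : n ∉ v := by
        simpa [PySem.Set.contains, List.elem_iff] using hcf
      have hadd : PySem.Set.add v n = v ++ [n] := by
        simp [PySem.Set.add, hnv]
      have hstep : (List.foldl (fun vq n => if PySem.Set.contains vq.1 n then vq
          else (PySem.Set.add vq.1 n, vq.2 ++ [n])) (v, qu) (n :: ns'))
          = (List.foldl (fun vq n => if PySem.Set.contains vq.1 n then vq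
          else (PySem.Set.add vq.1 n, vq.2 ++ [n])) (v ++ [n], qu ++ [n]) ns') := by
        rw [List.foldl_cons]
        simp only []
        rw [hcf]
        simp [hadd]
      rw [hstep]
      have hnd' : (v ++ [n]).Nodup := by
        rw [List.nodup_append]
        exact ⟨hnd, List.nodup_singleton n, by
          intro a ha b hb hab
          simp at hb
          subst hb
          exact hnv (hab ▸ ha)⟩
      have hr := ih (v ++ [n]) (qu ++ [n]) hnd'
        (by
          intro u hu
          rcases List.mem_append.1 hu with h | h
          · exact List.mem_append_left _ (hquv u h)
          · exact List.mem_append_right _ h)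
        (by
          intro u hu
          rcases List.mem_append.1 hu with h | h
          · exact hvP u h
          · rw [List.mem_singleton.1 h]; exact hnsP n (by simp))
        (fun z hz => hnsP z (by simp [hz]))
      refine ⟨?_, hr.2.1, hr.2.2.1, hr.2.2.2.1, ?_, ?_, ?_, ?_⟩
      · intro x hx
        exact hr.1 x (List.mem_append_left _ hx)
      · intro z hz
        rcases List.mem_cons.1 hz with rfl | hz'
        · exact hr.1 z (List.mem_append_right _ (by simp))
        · exact hr.2.2.2.2.1 z hz'
      · intro u hu
        rcases hr.2.2.2.2.2.1 u hu with h | h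
        · rcases List.mem_append.1 h with h' | h'
          · exact Or.inl h'
          · simp at h'
            subst h'
            exact Or.inr (hr.2.2.2.2.2.2.1 u (List.mem_append_right _ (by simp)))
        · exact Or.inr h
      · intro u hu
        exact hr.2.2.2.2.2.2.1 u (List.mem_append_left _ hu)
      · have := hr.2.2.2.2.2.2.2
        simp only [List.length_append, List.length_cons, List.length_nil] at this ⊢
        omega

theorem floodLemma (S : PySem.Set (Int × Int)) (P : List (Int × Int))
    (hPS : ∀ x ∈ P, x ∈ S)
    (hclosed : ∀ u ∈ P, ∀ z ∈ pvNbrsB S u, z ∈ P) :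
    ∀ (fuel : Nat) (v qu : List (Int × Int)),
      v.Nodup → (∀ u ∈ qu, u ∈ v) → (∀ u ∈ v, u ∈ P) →
      (∀ u ∈ v, u ∈ qu ∨ ∀ z ∈ pvNbrsB S u, z ∈ v) →
      qu.length + S.length < fuel + v.length →
      (∀ x ∈ v, x ∈ pvFloodB S fuel v qu) ∧
        (pvFloodB S fuel v qu).Nodup ∧
        (∀ u ∈ pvFloodB S fuel v qu, u ∈ P) ∧
        (∀ u ∈ pvFloodB S fuel v qu, ∀ z ∈ pvNbrsB S u, z ∈ pvFloodB S fuel v qu) := by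
  intro fuel
  induction fuel with
  | zero =>
    intro v qu hnd hquv hvP _ harith
    exfalso
    have hlen := nodup_subset_length hnd (fun x hx => hPS x (hvP x hx))
    omega
  | succ f ih =>
    intro v qu hnd hquv hvP hsemi harith
    cases qu with
    | nil =>
      rw [pvFloodB]
      refine ⟨fun x hx => hx, hnd, hvP, ?_⟩
      intro u hu z hz
      rcases hsemi u hu with h | h
      · simp at h
      · exact h z hz
    | cons cur rest =>
      rw [pvFloodB]
      have hcurP : cur ∈ P := hvP cur (hquv cur (by simp))
      have hnsP : ∀ z ∈ pvNbrsB S cur, z ∈ P := hclosed cur hcurP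
      have hff := floodFold P (pvNbrsB S cur) v rest hnd
        (fun u hu => hquv u (by simp [hu])) hvP hnsP
      obtain ⟨hmono, hnd', hquv', hvP', hns', hvor, hrest', hlen'⟩ := hff
      have hsemi' : ∀ u ∈ (List.foldl (fun vq n => if PySem.Set.contains vq.1 n then vq
          else (PySem.Set.add vq.1 n, vq.2 ++ [n])) (v, rest) (pvNbrsB S cur)).1,
          u ∈ (List.foldl (fun vq n => if PySem.Set.contains vq.1 n then vq
          else (PySem.Set.add vq.1 n, vq.2 ++ [n])) (v, rest) (pvNbrsB S cur)).2
          ∨ ∀ z ∈ pvNbrsB S u, z ∈ (List.foldl (fun vq n => if PySem.Set.contains vq.1 n then vq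
          else (PySem.Set.add vq.1 n, vq.2 ++ [n])) (v, rest) (pvNbrsB S cur)).1 := by
        intro u hu
        rcases hvor u hu with h | h
        · rcases hsemi u h with h2 | h2
          · rcases List.mem_cons.1 h2 with rfl | h3
            · exact Or.inr (fun z hz => hns' z hz)
            · exact Or.inl (hrest' u h3)
          · exact Or.inr (fun z hz => hmono z (h2 z hz))
        · exact Or.inl h
      have harith' : (List.foldl (fun vq n => if PySem.Set.contains vq.1 n then vq
          else (PySem.Set.add vq.1 n, vq.2 ++ [n])) (v, rest) (pvNbrsB S cur)).2.length + S.length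
          < f + (List.foldl (fun vq n => if PySem.Set.contains vq.1 n then vq
          else (PySem.Set.add vq.1 n, vq.2 ++ [n])) (v, rest) (pvNbrsB S cur)).1.length := by
        simp only [List.length_cons] at harith
        omega
      have hr := ih _ _ hnd' hquv' hvP' hsemi' harith'
      exact ⟨fun x hx => hr.1 x (hmono x hx), hr.2.1, hr.2.2.1, hr.2.2.2⟩

theorem items_neighborsA (cells : List (Int × Int)) :
    ((PySem.Set.ofList cells).foldl
      (fun d cell => d.insert cell ((pvCand cell).filter
        (fun p => PySem.Set.contains (PySem.Set.ofList cells) p)))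
      PySem.Dict.empty).items
    = (PySem.Set.ofList cells).map (fun c => (c, pvNbrsB (PySem.Set.ofList cells) c)) := by
  have h := dict_foldl_insert_items (kf := fun c : Int × Int => c)
    (vf := fun c => pvNbrsB (PySem.Set.ofList cells) c)
    (PySem.Set.ofList cells) PySem.Dict.empty
    (by simpa using PySem.Set.nodup_ofList cells)
    (by intro k _ p hp; simp [PySem.Dict.empty] at hp)
  simpa [pvNbrsB, PySem.Dict.empty] using h

theorem getD_neighborsA (cells : List (Int × Int)) (c : Int × Int)
    (hc : c ∈ PySem.Set.ofList cells) :
    ((PySem.Set.ofList cells).foldl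
      (fun d cell => d.insert cell ((pvCand cell).filter
        (fun p => PySem.Set.contains (PySem.Set.ofList cells) p)))
      PySem.Dict.empty).getD c []
    = pvNbrsB (PySem.Set.ofList cells) c := by
  rw [PySem.Dict.getD, PySem.Dict.get?, items_neighborsA]
  rw [dict_table_get? _ _ c hc]
  rfl

theorem items_degreesA (cells : List (Int × Int)) :
    ((((PySem.Set.ofList cells).foldl
      (fun d cell => d.insert cell ((pvCand cell).filter
        (fun p => PySem.Set.contains (PySem.Set.ofList cells) p)))
      PySem.Dict.empty).items).foldl
        (fun d cv => d.insert cv.1 ((cv.2.length : Int))) PySem.Dict.empty).items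
    = (PySem.Set.ofList cells).map
        (fun c => (c, ((pvNbrsB (PySem.Set.ofList cells) c).length : Int))) := by
  rw [items_neighborsA]
  have h := dict_foldl_insert_items (kf := fun cv : (Int × Int) × List (Int × Int) => cv.1)
    (vf := fun cv => (cv.2.length : Int))
    ((PySem.Set.ofList cells).map (fun c => (c, pvNbrsB (PySem.Set.ofList cells) c)))
    PySem.Dict.empty
    (by
      have he : List.map ((fun cv : (Int × Int) × List (Int × Int) => cv.1)
            ∘ fun c => (c, pvNbrsB (PySem.Set.ofList cells) c)) (PySem.Set.ofList cells)
          = PySem.Set.ofList cells := List.map_id'' (fun x => rfl) _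
      rw [List.map_map, he]
      exact PySem.Set.nodup_ofList cells)
    (by intro k _ p hp; simp [PySem.Dict.empty] at hp)
  simpa [List.map_map, Function.comp, PySem.Dict.empty] using h

theorem core_eq (cells : List (Int × Int)) (start : Int × Int)
    (hdeg : ∀ c ∈ PySem.Set.ofList cells, (pvNbrsB (PySem.Set.ofList cells) c).length ≤ 2)
    (hstartS : start ∈ PySem.Set.ofList cells)
    (hstart1 : (pvNbrsB (PySem.Set.ofList cells) start).length = 1) :
    (if pvTurnsA (pvWalkA
        ((PySem.Set.ofList cells).foldl
          (fun d cell => d.insert cell ((pvCand cell).filter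
            (fun p => PySem.Set.contains (PySem.Set.ofList cells) p)))
          PySem.Dict.empty)
        ((PySem.Set.ofList cells).length + 1) none start [start]) ≤ 1 then (6 : Int) else 9)
    = (if (pvFloodB (PySem.Set.ofList cells) ((PySem.Set.ofList cells).length + 1)
          (PySem.Set.add PySem.Set.empty start) [start]).countP
            (fun c => pvCornerB (PySem.Set.ofList cells) c) ≤ 1 then (6 : Int) else 9) := by
  set S := PySem.Set.ofList cells with hS
  -- A's walk is the suffix walk from start
  have hwalk : pvWalkA
      (S.foldl (fun d cell => d.insert cell ((pvCand cell).filter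
        (fun p => PySem.Set.contains S p))) PySem.Dict.empty)
      (S.length + 1) none start [start]
      = [start] ++ pvW S (S.length + 1) none start := by
    exact pvWalkA_eq_pvW S _ (fun c hc => getD_neighborsA cells c hc) _ none start [start] hstartS
  rw [hwalk]
  -- walk invariants
  have hinv0 : pvInv S ([] ++ [start]) := by
    refine ⟨by simp, by simp, ?_, by simpa using hstartS⟩
    intro a b c hin z hz
    exfalso
    have := hin.length_le
    simp at this
  have hw := walkInv S hdeg hstart1 (S.length + 1) [] start (by simp) hinv0 (by simp)
  simp only [List.nil_append, List.getLast?_nil] at hw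
  obtain ⟨hinvP, hendP, hheadP⟩ := hw
  set w := pvW S (S.length + 1) none start with hwdef
  -- the path is the component of start and the corner count is the turn count
  have hcnt : (List.countP (fun c => pvCornerB S c) w : Int) = pvTurnsA (start :: w) :=
    cornerAux S hdeg w start hinvP.1 hinvP.2.1 hinvP.2.2.1 hendP.1 hinvP.2.2.2
  have hcornerstart : pvCornerB S start = false :=
    corner_false_of_len_le_one (by omega)
  have hcntP : (List.countP (fun c => pvCornerB S c) ([start] ++ w) : Int)
      = pvTurnsA ([start] ++ w) := by
    simp only [List.singleton_append, List.countP_cons, hcornerstart]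
    simpa using hcnt
  -- flood fill computes exactly the path cells
  have hstartP : start ∈ [start] ++ w := by simp
  have hclosed := closedSet S hstart1 hinvP hendP hheadP
  have hv0 : PySem.Set.add PySem.Set.empty start = [start] := by
    simp [PySem.Set.add, PySem.Set.empty, PySem.Set.contains]
  rw [hv0]
  have hfl := floodLemma S ([start] ++ w) hinvP.2.2.2 hclosed (S.length + 1)
    [start] [start] (by simp) (by simp) (by simpa using hstartP)
    (by intro u hu; exact Or.inl hu) (by simp; omega)
  obtain ⟨hmono, hndV, hVP, hVcl⟩ := hfl
  set V := pvFloodB S (S.length + 1) [start] [start] with hVdef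
  have hPV : ∀ x ∈ [start] ++ w, x ∈ V :=
    chainProp S V hVcl ([start] ++ w) hinvP.2.1 start hheadP (hmono start (by simp))
  have hperm : V.Perm ([start] ++ w) :=
    (List.perm_ext_iff_of_nodup hndV hinvP.1).2 (fun a => ⟨fun h => hVP a h, fun h => hPV a h⟩)
  have hcntV : List.countP (fun c => pvCornerB S c) V
      = List.countP (fun c => pvCornerB S c) ([start] ++ w) :=
    hperm.countP_eq _
  rw [hcntV]
  have hfin : pvTurnsA ([start] ++ w)
      = (List.countP (fun c => pvCornerB S c) ([start] ++ w) : Int) := hcntP.symm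
  rw [hfin]
  have hiff : ((List.countP (fun c => pvCornerB S c) ([start] ++ w) : Int) ≤ 1)
      ↔ (List.countP (fun c => pvCornerB S c) ([start] ++ w) ≤ 1) := by omega
  exact if_congr hiff rfl rfl

theorem ports_agree (cells : List (Int × Int)) :
    component_type_py cells = component_type_py_alt cells := by
  unfold component_type_py component_type_py_alt
  dsimp only []
  simp only [PySem.Dict.values, items_degreesA cells, List.any_map, List.filter_map,
    List.map_map]
  have eAny : ((PySem.Set.ofList cells).any
        ((fun d => decide (2 < d)) ∘ (fun x => x.2)
          ∘ (fun c => (c, ((pvNbrsB (PySem.Set.ofList cells) c).length : Int)))))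
      = (PySem.Set.ofList cells).any
        (fun c => decide (2 < (pvNbrsB (PySem.Set.ofList cells) c).length)) := by
    refine List.any_congr rfl ?_
    intro a
    simp only [Function.comp]
    rw [Bool.eq_iff_iff]
    simp only [decide_eq_true_eq]
    omega
  have eEp : (List.map ((fun x => x.1) ∘ (fun c => (c, ((pvNbrsB (PySem.Set.ofList cells) c).length : Int))))
        ((PySem.Set.ofList cells).filter
          ((fun cd => cd.2 == 1) ∘ (fun c => (c, ((pvNbrsB (PySem.Set.ofList cells) c).length : Int))))))
      = (PySem.Set.ofList cells).filter
          (fun c => (pvNbrsB (PySem.Set.ofList cells) c).length == 1) := by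
    rw [show ((fun x : (Int × Int) × Int => x.1)
          ∘ (fun c => (c, ((pvNbrsB (PySem.Set.ofList cells) c).length : Int))))
        = (fun c : Int × Int => c) from funext (fun x => rfl)]
    rw [List.map_id']
    refine List.filter_congr ?_
    intro x _
    simp only [Function.comp]
    rw [Bool.eq_iff_iff]
    simp only [beq_iff_eq]
    omega
  rw [eAny, eEp]
  by_cases h1 : (PySem.Set.ofList cells).any
      (fun c => decide (2 < (pvNbrsB (PySem.Set.ofList cells) c).length)) = true
  · simp [h1]
  · have h1f : (PySem.Set.ofList cells).any
        (fun c => decide (2 < (pvNbrsB (PySem.Set.ofList cells) c).length)) = false := by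
      rwa [Bool.not_eq_true] at h1
    have hdeg : ∀ c ∈ PySem.Set.ofList cells,
        (pvNbrsB (PySem.Set.ofList cells) c).length ≤ 2 := by
      intro c hc
      have := List.any_eq_false.1 h1f c hc
      simp at this
      omega
    by_cases h2 : ((PySem.Set.ofList cells).filter
        (fun c => (pvNbrsB (PySem.Set.ofList cells) c).length == 1)).length = 2
    · simp only [h1f, h2, Bool.false_or, ne_eq, not_true_eq_false, decide_false,
        Bool.false_eq_true, if_false]
      cases hmin : PySem.List.min2?
          ((PySem.Set.ofList cells).filter
            (fun c => (pvNbrsB (PySem.Set.ofList cells) c).length == 1))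
          (fun x => x.1) (fun x => x.2) with
      | none => rfl
      | some start =>
        have hstartEp := min2?_mem hmin
        have hstartS : start ∈ PySem.Set.ofList cells := (List.mem_filter.1 hstartEp).1
        have hstart1 : (pvNbrsB (PySem.Set.ofList cells) start).length = 1 := by
          have := (List.mem_filter.1 hstartEp).2
          simpa using this
        exact core_eq cells start hdeg hstartS hstart1
    · simp [h1f, h2]

-- ===== VERDICT (by name: the statement is the Claim_ definition above) =====
theorem component_type_py_spec : Claim_equal_component_type_py := by
  intro cells _
  unfold Spec_component_type_py
  exact ports_agree cells
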